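-- pv_equiv track=rewrite | github.com/marco47t/windows-ai-assistant | services/chat_service.py | _should_use_tool
-- ===== SOURCE A (Python) =====
-- def _should_use_tool(message: str) -> bool:
--     """Determine if message requires tools."""
--     tool_keywords = [
--         'latest', 'current', 'recent', 'news', 'search',
--         'find', 'look up', 'who is', 'what is', 'when',
--         'read', 'visit', 'open'
--     ]
--
--     message_lower = message.lower()
--     return any(keyword in message_lower for keyword in tool_keywords)
-- ===== SOURCE B (Python) =====
-- _TOOL_KEYWORDS = [
--     'latest', 'current', 'recent', 'news', 'search',
--     'find', 'look up', 'who is', 'what is', 'when',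
--     'read', 'visit', 'open'
-- ]
--
-- # index the keywords once by their length: length -> set of keywords of that length
-- _KEYWORDS_BY_LEN = {}
-- for _k in _TOOL_KEYWORDS:
--     _KEYWORDS_BY_LEN.setdefault(len(_k), set()).add(_k)
--
--
-- def _should_use_tool(message: str) -> bool:
--     """Determine if message requires tools."""
--     m = message.lower()
--     n = len(m)
--     for i in range(n):
--         for length, words in _KEYWORDS_BY_LEN.items():
--             if i + length <= n and m[i:i + length] in words:
--                 return True
--     return False
-- ===== Notes on version B (the rewrite author's own statement) =====
-- stated objective: alternative
-- what changed: A searches each keyword as a substring of the lowered message; B instead indexes the keywords once by length into hash sets and makes a single scan over positions, testing the fixed-length window at each position for exact set membership, so the per-keyword substring-search inner pass disappears.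
import Mathlib
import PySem

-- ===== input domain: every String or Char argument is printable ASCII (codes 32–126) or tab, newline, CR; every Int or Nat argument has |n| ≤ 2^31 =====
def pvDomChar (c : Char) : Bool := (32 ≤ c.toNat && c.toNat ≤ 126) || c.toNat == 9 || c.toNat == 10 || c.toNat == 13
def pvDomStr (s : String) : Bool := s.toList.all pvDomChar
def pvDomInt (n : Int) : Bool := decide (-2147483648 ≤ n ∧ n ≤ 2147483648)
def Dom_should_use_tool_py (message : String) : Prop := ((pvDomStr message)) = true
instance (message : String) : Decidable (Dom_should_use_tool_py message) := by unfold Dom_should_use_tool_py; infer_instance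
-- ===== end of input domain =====

-- B replaces A's per-keyword substring search by a length-indexed table of keyword
-- sets and one scan over positions testing each fixed-length window by set membership.

-- ===== PORT A =====
-- the keyword list of _should_use_tool
def toolKeywordsA : List String :=
  ["latest", "current", "recent", "news", "search",
   "find", "look up", "who is", "what is", "when",
   "read", "visit", "open"]

def should_use_tool_py (message : String) : Bool :=
  let message_lower := PySem.Str.lower message
  toolKeywordsA.any (fun keyword => PySem.Str.isIn keyword message_lower)

-- ===== PORT B =====
-- Source B's _KEYWORDS_BY_LEN: keywords indexed once by length (dict insertion order)
def kwByLenB : List (Nat × List (List Char)) :=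
  [(6, ["latest".toList, "recent".toList, "search".toList, "who is".toList]),
   (7, ["current".toList, "look up".toList, "what is".toList]),
   (4, ["news".toList, "find".toList, "when".toList, "read".toList, "open".toList]),
   (5, ["visit".toList])]

-- the inner loop of Source B at one position: some length class whose window here is in its set
def windowHitB (t : List Char) : Bool :=
  kwByLenB.any (fun p => decide (p.1 ≤ t.length) && p.2.any (fun k => t.take p.1 == k))

-- Source B's `for i in range(n)` scan over positions
def scanB : List Char → Bool
  | [] => false
  | c :: t => windowHitB (c :: t) || scanB t

def should_use_tool_py_alt (message : String) : Bool :=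
  scanB (PySem.Chars.lower message.toList)

-- ===== PRECONDITION & SPEC =====
def Spec_should_use_tool_py (message : String) (out : Bool) : Prop := out = should_use_tool_py_alt message
instance (message : String) (out : Bool) : Decidable (Spec_should_use_tool_py message out) := by unfold Spec_should_use_tool_py; infer_instance

-- ===== CLAIM (what is proved, stated in full; the proofs are below) =====
def Claim_equal_should_use_tool_py : Prop := ∀ (message : String), Dom_should_use_tool_py message → Spec_should_use_tool_py message (should_use_tool_py message)

-- ===== LEMMAS AND PROOFS =====

-- every keyword stored under length L really has length L
theorem kwByLenB_wf : ∀ p ∈ kwByLenB, ∀ k ∈ p.2, k.length = p.1 := by decide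

-- the flattened table is (a permutation of) A's keyword list
theorem kwByLenB_flat_perm :
    (kwByLenB.flatMap Prod.snd).Perm (toolKeywordsA.map String.toList) := by decide

-- the window test at a position succeeds iff some keyword is a prefix of the suffix there
theorem windowHitB_iff (t : List Char) :
    windowHitB t = true ↔ ∃ k ∈ kwByLenB.flatMap Prod.snd, k <+: t := by
  simp only [windowHitB, List.any_eq_true, Bool.and_eq_true, decide_eq_true_eq,
    beq_iff_eq, List.mem_flatMap]
  constructor
  · rintro ⟨p, hp, hle, k, hk, htk⟩
    refine ⟨k, ⟨p, hp, hk⟩, ?_⟩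
    have hlen : k.length = p.1 := kwByLenB_wf p hp k hk
    rw [List.prefix_iff_eq_take, hlen, htk]
  · rintro ⟨k, ⟨p, hp, hk⟩, hpre⟩
    have hlen : k.length = p.1 := kwByLenB_wf p hp k hk
    refine ⟨p, hp, hlen ▸ hpre.length_le, k, hk, ?_⟩
    rw [← hlen]
    exact (List.prefix_iff_eq_take.mp hpre).symm

-- the scan finds a match iff some keyword is an infix of the text
theorem scanB_eq_true_iff (cs : List Char) :
    scanB cs = true ↔ ∃ k ∈ kwByLenB.flatMap Prod.snd, k <:+: cs := by
  induction cs with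
  | nil =>
    simp only [scanB, Bool.false_eq_true, false_iff]
    rintro ⟨k, hk, hi⟩
    rw [List.infix_nil] at hi
    subst hi
    revert hk
    decide
  | cons c t ih =>
    simp only [scanB, Bool.or_eq_true, windowHitB_iff, ih]
    constructor
    · rintro (⟨k, hk, hp⟩ | ⟨k, hk, hi⟩)
      · exact ⟨k, hk, hp.isInfix⟩
      · exact ⟨k, hk, List.infix_cons hi⟩
    · rintro ⟨k, hk, hi⟩
      rcases List.infix_cons_iff.mp hi with hp | hi'
      · exact Or.inl ⟨k, hk, hp⟩
      · exact Or.inr ⟨k, hk, hi'⟩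

-- ===== VERDICT (by name: the statement is the Claim_ definition above) =====
theorem should_use_tool_py_spec : Claim_equal_should_use_tool_py := by
  intro message _
  unfold Spec_should_use_tool_py
  rw [Bool.eq_iff_iff]
  unfold should_use_tool_py should_use_tool_py_alt
  rw [scanB_eq_true_iff]
  simp only [List.any_eq_true, PySem.Str.isIn_iff_infix]
  constructor
  · rintro ⟨k, hk, hi⟩
    refine ⟨k.toList, kwByLenB_flat_perm.mem_iff.mpr (List.mem_map_of_mem hk), ?_⟩
    simpa [PySem.Str.lower] using hi
  · rintro ⟨k, hk, hi⟩
    obtain ⟨s, hs, rfl⟩ := List.mem_map.mp (kwByLenB_flat_perm.mem_iff.mp hk)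
    exact ⟨s, hs, by simpa [PySem.Str.lower] using hi⟩
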